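-- pv_equiv track=rewrite | github.com/need-singularity/sylvian-singularity | calc/theta_perfect_pattern.py | e8_theta_series
-- ===== SOURCE A (Python) =====
-- def e8_theta_series(n_max):
--     """Theta series of E8 lattice.
--     Theta_E8(q) = 1 + 240*sum_{n=1}^{inf} sigma_3(n)*q^n
--     where sigma_3(n) = sum of cubes of divisors of n.
--
--     Coefficients give number of vectors of norm 2n in E8.
--     Actually: number of vectors of squared norm 2n.
--     The coefficient of q^n is the number of lattice vectors with |v|^2 = 2n.
--     """
--     def sigma_k(n, k=3):
--         """Sum of k-th powers of divisors."""
--         s = 0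
--         for d in range(1, n + 1):
--             if n % d == 0:
--                 s += d**k
--         return s
--
--     coeffs = [0] * (n_max + 1)
--     coeffs[0] = 1
--     for n in range(1, n_max + 1):
--         coeffs[n] = 240 * sigma_k(n, 3)
--     return coeffs
-- ===== SOURCE B (Python) =====
-- def e8_theta_series(n_max):
--     """Theta series of E8 via a divisor sieve: for each d, add d**3 to
--     sigma_3 of every multiple of d.  O(n log n) instead of A's O(n^2)."""
--     sigma = [0] * (n_max + 1)
--     for d in range(1, n_max + 1):
--         c = d ** 3
--         for m in range(d, n_max + 1, d):
--             sigma[m] += c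
--     return [1] + [240 * s for s in sigma[1:]]
-- ===== Notes on version B (the rewrite author's own statement) =====
-- stated objective: faster
-- what changed: Replaces A's per-n trial-division divisor sum (sigma_3 recomputed from scratch for every n) by a single divisor sieve that adds d^3 to all multiples of d, then scales once by 240.
import Mathlib
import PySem

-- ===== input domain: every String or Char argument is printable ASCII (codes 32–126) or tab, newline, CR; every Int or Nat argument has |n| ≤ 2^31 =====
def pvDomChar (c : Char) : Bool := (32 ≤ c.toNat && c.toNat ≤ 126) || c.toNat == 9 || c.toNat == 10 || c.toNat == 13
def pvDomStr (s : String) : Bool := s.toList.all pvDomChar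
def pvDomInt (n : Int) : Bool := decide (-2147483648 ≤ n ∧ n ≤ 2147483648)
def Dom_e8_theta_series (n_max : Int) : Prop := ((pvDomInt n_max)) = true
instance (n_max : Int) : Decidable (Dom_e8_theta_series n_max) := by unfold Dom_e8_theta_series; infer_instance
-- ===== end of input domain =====

-- B replaces A's per-n trial-division sigma_3 (O(n^2)) by a single divisor sieve adding d^3
-- to every multiple of d (objective: faster, asymptotically).

-- ===== PORT A =====
-- sigma_k(n, k): trial division over d = 1..n; Python's d**k ported as d ^ k.toNat (exact for the
-- only call k = 3; n % d == 0 is PySem.Int.mod, d ≥ 1 here so no ZeroDivisionError)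
def pvSigmaK (n k : Int) : Int :=
  (PySem.List.pyRange 1 (n + 1) 1).foldl
    (fun s d => if PySem.Int.mod n d = 0 then s + d ^ k.toNat else s) 0

-- coeffs = [0]*(n_max+1); coeffs[0] = 1 (IndexError for negative n_max — excluded by Pre_);
-- for n in range(1, n_max+1): coeffs[n] = 240*sigma_k(n, 3)   (index n always in range here)
def e8_theta_series (n_max : Int) : List Int :=
  (PySem.List.pyRange 1 (n_max + 1) 1).foldl
    (fun cs n => cs.set n.toNat (240 * pvSigmaK n 3))
    ((List.replicate (n_max + 1).toNat (0 : Int)).set 0 1)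

-- ===== PORT B =====
-- inner sieve loop: for m in range(d, n_max+1, d): sigma[m] += c   with c = d**3
-- (sigma[m] read is in range, ported with pyGetD; write with List.set at m.toNat, m ≥ 1 here)
def pvInner (b d : Int) (s : List Int) : List Int :=
  (PySem.List.pyRange d b d).foldl
    (fun s m => s.set m.toNat (PySem.List.pyGetD s m 0 + d ^ (3 : Nat))) s

-- sigma = [0]*(n_max+1); sieve over d = 1..n_max; return [1] + [240*s for s in sigma[1:]]
-- (sigma[1:] is slice from nonneg start 1 = List.drop 1)
def e8_theta_series_alt (n_max : Int) : List Int :=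
  1 :: ((((PySem.List.pyRange 1 (n_max + 1) 1).foldl (fun s d => pvInner (n_max + 1) d s)
          (List.replicate (n_max + 1).toNat (0 : Int))).drop 1).map (fun x => 240 * x))

-- ===== PRECONDITION & SPEC =====
-- Python A raises IndexError (the coeffs[0] = 1 write hits an empty list) for every negative n_max
def Pre_e8_theta_series (n_max : Int) : Prop := 0 ≤ n_max
instance (n_max : Int) : Decidable (Pre_e8_theta_series n_max) := by unfold Pre_e8_theta_series; infer_instance
def pvWitness_e8_theta_series : Int := 8

def Spec_e8_theta_series (n_max : Int) (out : List Int) : Prop := out = e8_theta_series_alt n_max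
instance (n_max : Int) (out : List Int) : Decidable (Spec_e8_theta_series n_max out) := by unfold Spec_e8_theta_series; infer_instance

-- ===== CLAIM (what is proved, stated in full; the proofs are below) =====
def Claim_equal_e8_theta_series : Prop := ∀ (n_max : Int), Dom_e8_theta_series n_max → Pre_e8_theta_series n_max → Spec_e8_theta_series n_max (e8_theta_series n_max)

-- ===== LEMMAS AND PROOFS =====

-- a fold of in-place updates preserves the list's length
lemma pv_foldl_set_length (g : List Int → Int → Int) (ix : Int → Nat) :
    ∀ (L : List Int) (s : List Int),
      (L.foldl (fun s m => s.set (ix m) (g s m)) s).length = s.length := by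
  intro L
  induction L with
  | nil => intro s; rfl
  | cons m L ih => intro s; rw [List.foldl_cons, ih, List.length_set]

-- A's loop: setting index n to f n for each n in L (all ≥ 0); element j of the result
lemma pv_foldl_setf_getElem? (f : Int → Int) :
    ∀ (L : List Int), (∀ m ∈ L, 0 ≤ m) → ∀ (s : List Int) (j : Nat),
      (L.foldl (fun s n => s.set n.toNat (f n)) s)[j]? =
        if (j : Int) ∈ L ∧ j < s.length then some (f (j : Int)) else s[j]? := by
  intro L
  induction L with
  | nil => intro _ s j; simp
  | cons n L ih =>
    intro hpos s j
    have hn : 0 ≤ n := hpos n (List.mem_cons_self ..)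
    rw [List.foldl_cons, ih (fun m hm => hpos m (List.mem_cons_of_mem _ hm)),
        List.length_set, List.getElem?_set]
    by_cases hL : (j : Int) ∈ L
    · by_cases hlen : j < s.length
      · rw [if_pos ⟨hL, hlen⟩, if_pos ⟨List.mem_cons_of_mem _ hL, hlen⟩]
      · rw [if_neg (show ¬((j : Int) ∈ L ∧ j < s.length) from fun h => hlen h.2),
            if_neg (show ¬((j : Int) ∈ n :: L ∧ j < s.length) from fun h => hlen h.2)]
        by_cases he : n.toNat = j
        · rw [if_pos he, if_neg (show ¬ n.toNat < s.length by omega)]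
          exact (List.getElem?_eq_none (by omega)).symm
        · rw [if_neg he]
    · rw [if_neg (fun h => hL h.1)]
      by_cases he : n.toNat = j
      · have hnj : n = (j : Int) := by omega
        by_cases hlen : j < s.length
        · rw [if_pos he, if_pos (show n.toNat < s.length by omega),
              if_pos ⟨by rw [← hnj]; exact List.mem_cons_self .., hlen⟩, hnj]
        · rw [if_pos he, if_neg (show ¬ n.toNat < s.length by omega),
              if_neg (show ¬((j : Int) ∈ n :: L ∧ j < s.length) from fun h => hlen h.2)]
          exact (List.getElem?_eq_none (by omega)).symm
      · have h2 : ¬ ((j : Int) ∈ n :: L ∧ j < s.length) := by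
          rintro ⟨h1, _⟩
          rcases List.mem_cons.1 h1 with h' | h'
          · exact he (by omega)
          · exact hL h'
        rw [if_neg he, if_neg h2]

-- B's inner loop: adding c at every index of L (distinct, all ≥ 1); element j of the result
lemma pv_foldl_addset_getElem? (c : Int) :
    ∀ (L : List Int), L.Nodup → (∀ m ∈ L, 1 ≤ m) → ∀ (s : List Int) (j : Nat),
      (L.foldl (fun s m => s.set m.toNat (PySem.List.pyGetD s m 0 + c)) s)[j]? =
        if (j : Int) ∈ L ∧ j < s.length then some (s.getD j 0 + c) else s[j]? := by
  intro L
  induction L with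
  | nil => intro _ _ s j; simp
  | cons m L ih =>
    intro hnd hpos s j
    have hm : 1 ≤ m := hpos m (List.mem_cons_self ..)
    have hget : PySem.List.pyGetD s m 0 = s.getD m.toNat 0 :=
      PySem.List.pyGetD_of_nonneg s 0 (by omega)
    rw [List.foldl_cons, ih hnd.of_cons (fun x hx => hpos x (List.mem_cons_of_mem _ hx)),
        List.length_set]
    by_cases hL : (j : Int) ∈ L
    · have hjm : (j : Int) ≠ m := fun h => (List.nodup_cons.1 hnd).1 (h ▸ hL)
      have hne : m.toNat ≠ j := fun h => hjm (by omega)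
      have hsame : (s.set m.toNat (PySem.List.pyGetD s m 0 + c)).getD j 0 = s.getD j 0 := by
        rw [List.getD_eq_getElem?_getD, List.getElem?_set, if_neg hne, ← List.getD_eq_getElem?_getD]
      by_cases hlen : j < s.length
      · rw [if_pos ⟨hL, hlen⟩, if_pos ⟨List.mem_cons_of_mem _ hL, hlen⟩, hsame]
      · rw [if_neg (show ¬((j : Int) ∈ L ∧ j < s.length) from fun h => hlen h.2),
            if_neg (show ¬((j : Int) ∈ m :: L ∧ j < s.length) from fun h => hlen h.2),
            List.getElem?_set, if_neg hne]
    · rw [if_neg (fun h => hL h.1), List.getElem?_set]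
      by_cases he : m.toNat = j
      · have hmj : m = (j : Int) := by omega
        by_cases hlen : j < s.length
        · rw [if_pos he, if_pos (show m.toNat < s.length by omega),
              if_pos ⟨by rw [← hmj]; exact List.mem_cons_self .., hlen⟩, hget, he]
        · rw [if_pos he, if_neg (show ¬ m.toNat < s.length by omega),
              if_neg (show ¬((j : Int) ∈ m :: L ∧ j < s.length) from fun h => hlen h.2)]
          exact (List.getElem?_eq_none (by omega)).symm
      · have h2 : ¬ ((j : Int) ∈ m :: L ∧ j < s.length) := by
          rintro ⟨h1, _⟩
          rcases List.mem_cons.1 h1 with h' | h'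
          · exact he (by omega)
          · exact hL h'
        rw [if_neg he, if_neg h2]

lemma pv_nodup_pyRange_pos (a b d : Int) (hd : 0 < d) : (PySem.List.pyRange a b d).Nodup := by
  rw [PySem.List.pyRange_of_pos a b hd]
  refine List.Nodup.map ?_ List.nodup_range
  intro x y h
  have h2 : d * (x : Int) = d * y := by linarith
  exact_mod_cast mul_left_cancel₀ (by omega) h2

lemma pv_pvInner_length (b d : Int) (s : List Int) : (pvInner b d s).length = s.length := by
  unfold pvInner
  exact pv_foldl_set_length _ _ _ s

lemma pv_pvInner_getElem? (b d : Int) (hd : 1 ≤ d) (s : List Int) (j : Nat) :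
    (pvInner b d s)[j]? =
      if (j : Int) ∈ PySem.List.pyRange d b d ∧ j < s.length
      then some (s.getD j 0 + d ^ (3 : Nat)) else s[j]? := by
  unfold pvInner
  exact pv_foldl_addset_getElem? (d ^ (3 : Nat)) _ (pv_nodup_pyRange_pos d b d (by omega))
    (fun m hm => by
      have := (PySem.List.mem_pyRange_iff_of_pos (by omega) m).1 hm
      omega) s j

-- sum of d^3 over divisors d of j with d ≤ t
def pvSigTo (j t : Nat) : Int :=
  ((PySem.List.pyRange 1 ((t : Int) + 1) 1).map
    (fun d => if PySem.Int.mod (j : Int) d = 0 then d ^ (3 : Nat) else 0)).sum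

lemma pv_sigTo_zero (j : Nat) : pvSigTo j 0 = 0 := by
  unfold pvSigTo
  rw [show ((0 : Nat) : Int) + 1 = 1 by norm_num, PySem.List.pyRange_one_eq_nil (le_refl 1)]
  rfl

lemma pv_sigTo_succ (j t : Nat) :
    pvSigTo j (t + 1) =
      pvSigTo j t + (if PySem.Int.mod (j : Int) ((t : Int) + 1) = 0 then ((t : Int) + 1) ^ (3 : Nat) else 0) := by
  unfold pvSigTo
  rw [show (((t + 1 : Nat)) : Int) + 1 = ((t : Int) + 1) + 1 by push_cast; ring,
      PySem.List.pyRange_one_succ_right (by omega), List.map_append, List.sum_append]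
  simp

lemma pv_sigTo_stable (j : Nat) (hj : 1 ≤ j) : ∀ t, j ≤ t → pvSigTo j t = pvSigTo j j := by
  intro t
  induction t with
  | zero => intro h; omega
  | succ t ih =>
    intro h
    by_cases h' : j ≤ t
    · rw [pv_sigTo_succ, ih h']
      have hne : ¬ PySem.Int.mod (j : Int) ((t : Int) + 1) = 0 := by
        rw [PySem.Int.mod_eq_zero_iff_dvd]
        intro hdvd
        have := Int.le_of_dvd (by omega) hdvd
        omega
      rw [if_neg hne, add_zero]
    · have he : j = t + 1 := by omega
      rw [he]

lemma pv_foldl_if_sum {p : Int → Prop} [DecidablePred p] (f : Int → Int) :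
    ∀ (L : List Int) (s0 : Int),
      L.foldl (fun s d => if p d then s + f d else s) s0
        = s0 + (L.map (fun d => if p d then f d else 0)).sum := by
  intro L
  induction L with
  | nil => intro s0; simp
  | cons d L ih =>
    intro s0
    rw [List.foldl_cons, ih, List.map_cons, List.sum_cons]
    split_ifs <;> ring

lemma pv_sigmaK_eq (j : Nat) : pvSigmaK (j : Int) 3 = pvSigTo j j := by
  unfold pvSigmaK pvSigTo
  rw [pv_foldl_if_sum, zero_add]
  simp only [show Int.toNat 3 = 3 from rfl]

lemma pv_outer_length (b : Int) : ∀ (t : Nat) (s : List Int),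
    ((PySem.List.pyRange 1 ((t : Int) + 1) 1).foldl (fun s d => pvInner b d s) s).length = s.length := by
  intro t
  induction t with
  | zero =>
    intro s
    rw [show ((0 : Nat) : Int) + 1 = 1 by norm_num, PySem.List.pyRange_one_eq_nil (le_refl 1)]
    rfl
  | succ t ih =>
    intro s
    rw [show (((t + 1 : Nat)) : Int) + 1 = ((t : Int) + 1) + 1 by push_cast; ring,
        PySem.List.pyRange_one_succ_right (by omega), List.foldl_append]
    simp only [List.foldl_cons, List.foldl_nil]
    rw [pv_pvInner_length, ih]

lemma pv_outer_getElem? (b : Int) : ∀ (t : Nat) (s : List Int) (j : Nat),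
    1 ≤ j → (j : Int) < b → j < s.length →
    ((PySem.List.pyRange 1 ((t : Int) + 1) 1).foldl (fun s d => pvInner b d s) s)[j]?
      = some (s.getD j 0 + pvSigTo j t) := by
  intro t
  induction t with
  | zero =>
    intro s j hj hb hlen
    rw [show ((0 : Nat) : Int) + 1 = 1 by norm_num, PySem.List.pyRange_one_eq_nil (le_refl 1),
        List.foldl_nil, pv_sigTo_zero, add_zero, List.getElem?_eq_getElem hlen,
        List.getD_eq_getElem?_getD, List.getElem?_eq_getElem hlen]
    rfl
  | succ t ih =>
    intro s j hj hb hlen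
    rw [show (((t + 1 : Nat)) : Int) + 1 = ((t : Int) + 1) + 1 by push_cast; ring,
        PySem.List.pyRange_one_succ_right (by omega), List.foldl_append]
    simp only [List.foldl_cons, List.foldl_nil]
    have hSlen : ((PySem.List.pyRange 1 ((t : Int) + 1) 1).foldl (fun s d => pvInner b d s) s).length = s.length :=
      pv_outer_length b t s
    have hSj := ih s j hj hb hlen
    have hSD : ((PySem.List.pyRange 1 ((t : Int) + 1) 1).foldl (fun s d => pvInner b d s) s).getD j 0
        = s.getD j 0 + pvSigTo j t := by
      rw [List.getD_eq_getElem?_getD, hSj]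
      rfl
    rw [pv_pvInner_getElem? b ((t : Int) + 1) (by omega) _ j]
    by_cases hdvd : ((t : Int) + 1) ∣ (j : Int)
    · have hmem : (j : Int) ∈ PySem.List.pyRange ((t : Int) + 1) b ((t : Int) + 1) := by
        rw [PySem.List.mem_pyRange_iff_of_pos (by omega)]
        exact ⟨Int.le_of_dvd (by omega) hdvd, hb, dvd_sub hdvd (dvd_refl _)⟩
      rw [if_pos ⟨hmem, by omega⟩, hSD, pv_sigTo_succ,
          if_pos (by rw [PySem.Int.mod_eq_zero_iff_dvd]; exact hdvd), add_assoc]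
    · have hmem : ¬ (j : Int) ∈ PySem.List.pyRange ((t : Int) + 1) b ((t : Int) + 1) := by
        rw [PySem.List.mem_pyRange_iff_of_pos (by omega)]
        rintro ⟨h1, h2, h3⟩
        exact hdvd (by have := dvd_add h3 (dvd_refl ((t : Int) + 1)); simpa using this)
      rw [if_neg (fun h => hmem h.1), hSj, pv_sigTo_succ,
          if_neg (by rw [PySem.Int.mod_eq_zero_iff_dvd]; exact hdvd), add_zero]

-- ===== VERDICT (by name: the statement is the Claim_ definition above) =====
theorem e8_theta_series_spec : Claim_equal_e8_theta_series := by
  unfold Claim_equal_e8_theta_series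
  intro n_max hdom hpre
  unfold Spec_e8_theta_series
  unfold Pre_e8_theta_series at hpre
  obtain ⟨N, rfl⟩ : ∃ N : Nat, n_max = (N : Int) := ⟨n_max.toNat, (Int.toNat_of_nonneg hpre).symm⟩
  have hcast : ((N : Int) + 1).toNat = N + 1 := by omega
  unfold e8_theta_series e8_theta_series_alt
  rw [hcast]
  apply List.ext_getElem?
  intro j
  rw [pv_foldl_setf_getElem? (fun n => 240 * pvSigmaK n 3) _
      (fun m hm => by rw [PySem.List.mem_pyRange_one] at hm; omega)]
  cases j with
  | zero =>
    have hc : ¬ (((0 : Nat) : Int) ∈ PySem.List.pyRange 1 ((N : Int) + 1) 1 ∧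
        (0 : Nat) < ((List.replicate (N + 1) (0 : Int)).set 0 1).length) := by
      rintro ⟨h1, _⟩
      rw [PySem.List.mem_pyRange_one] at h1
      omega
    rw [if_neg hc, List.getElem?_set]
    simp
  | succ i =>
    rw [List.getElem?_cons_succ, List.getElem?_map, List.getElem?_drop,
        show 1 + i = i + 1 from Nat.add_comm 1 i]
    by_cases hle : i + 1 < N + 1
    · rw [pv_outer_getElem? ((N : Int) + 1) N _ (i + 1) (by omega) (by push_cast; omega)
          (by rw [List.length_replicate]; omega)]
      have hrep : (List.replicate (N + 1) (0 : Int)).getD (i + 1) 0 = 0 := by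
        rw [List.getD_eq_getElem?_getD, List.getElem?_replicate]
        split_ifs <;> rfl
      rw [hrep, zero_add]
      have hcnd : (((i + 1 : Nat)) : Int) ∈ PySem.List.pyRange 1 ((N : Int) + 1) 1 ∧
          (i + 1) < ((List.replicate (N + 1) (0 : Int)).set 0 1).length := by
        constructor
        · rw [PySem.List.mem_pyRange_one]; push_cast; omega
        · rw [List.length_set, List.length_replicate]; omega
      rw [if_pos hcnd, pv_sigmaK_eq, ← pv_sigTo_stable (i + 1) (by omega) N (by omega)]
      rfl
    · have hlen2 : ((PySem.List.pyRange 1 ((N : Int) + 1) 1).foldl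
          (fun s d => pvInner ((N : Int) + 1) d s) (List.replicate (N + 1) (0 : Int))).length = N + 1 := by
        rw [pv_outer_length ((N : Int) + 1) N, List.length_replicate]
      have hnone : ((PySem.List.pyRange 1 ((N : Int) + 1) 1).foldl
          (fun s d => pvInner ((N : Int) + 1) d s) (List.replicate (N + 1) (0 : Int)))[i + 1]? = none :=
        List.getElem?_eq_none (by omega)
      rw [hnone]
      have hcnd : ¬ ((((i + 1 : Nat)) : Int) ∈ PySem.List.pyRange 1 ((N : Int) + 1) 1 ∧
          (i + 1) < ((List.replicate (N + 1) (0 : Int)).set 0 1).length) := by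
        rintro ⟨_, h2⟩
        rw [List.length_set, List.length_replicate] at h2
        omega
      have hrepn : (List.replicate (N + 1) (0 : Int))[i + 1]? = none :=
        List.getElem?_eq_none (by rw [List.length_replicate]; omega)
      rw [if_neg hcnd, List.getElem?_set, if_neg (by omega : ¬ (0 = i + 1)), hrepn]
      rfl
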